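-- pv_equiv track=rewrite | github.com/chrismmorin-ux/Perspective-Cosmology | verification/sympy/dual_cyclotomic_identity.py | check_identity
-- ===== SOURCE A (Python) =====
-- def Phi_3(x):
--     return x**2 + x + 1
--
-- def Phi_6(x):
--     return x**2 - x + 1
--
-- def check_identity(n1, n2, shift):
--     """Check if Phi_n1(x) = Phi_n2(x + shift) for small x"""
--     for x in range(2, 15):
--         v1 = None
--         v2 = None
--         if n1 == 3:
--             v1 = Phi_3(x)
--         elif n1 == 6:
--             v1 = Phi_6(x)
--         elif n1 == 4:
--             v1 = x**2 + 1
--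
--         if n2 == 3:
--             v2 = Phi_3(x + shift)
--         elif n2 == 6:
--             v2 = Phi_6(x + shift)
--         elif n2 == 4:
--             v2 = (x + shift)**2 + 1
--
--         if v1 != v2:
--             return False
--     return True
-- ===== SOURCE B (Python) =====
-- def _coeffs(n):
--     # quadratic x**2 + b*x + c for Phi_n, or None if n not handled
--     if n == 3:
--         return (1, 1)
--     if n == 6:
--         return (-1, 1)
--     if n == 4:
--         return (0, 1)
--     return None
--
--
-- def check_identity(n1, n2, shift):
--     """Check if Phi_n1(x) = Phi_n2(x + shift) for small x"""
--     c1 = _coeffs(n1)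
--     c2 = _coeffs(n2)
--     if c1 is None or c2 is None:
--         return c1 is None and c2 is None
--     b1, k1 = c1
--     b2, k2 = c2
--     # Phi_n2(x+shift) = x^2 + (2*shift + b2)*x + (shift^2 + b2*shift + k2)
--     return b1 == 2 * shift + b2 and k1 == shift * shift + b2 * shift + k2
-- ===== Notes on version B (the rewrite author's own statement) =====
-- stated objective: simpler
-- what changed: Replaces the 13-point evaluation loop with a closed-form comparison of quadratic coefficients: each handled n maps to (b,c) of x^2+bx+c, and Phi_n2(x+shift) is expanded symbolically, so the result is a direct coefficient equality test (valid because two monic quadratics agreeing at 13 points are identical).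
import Mathlib
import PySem

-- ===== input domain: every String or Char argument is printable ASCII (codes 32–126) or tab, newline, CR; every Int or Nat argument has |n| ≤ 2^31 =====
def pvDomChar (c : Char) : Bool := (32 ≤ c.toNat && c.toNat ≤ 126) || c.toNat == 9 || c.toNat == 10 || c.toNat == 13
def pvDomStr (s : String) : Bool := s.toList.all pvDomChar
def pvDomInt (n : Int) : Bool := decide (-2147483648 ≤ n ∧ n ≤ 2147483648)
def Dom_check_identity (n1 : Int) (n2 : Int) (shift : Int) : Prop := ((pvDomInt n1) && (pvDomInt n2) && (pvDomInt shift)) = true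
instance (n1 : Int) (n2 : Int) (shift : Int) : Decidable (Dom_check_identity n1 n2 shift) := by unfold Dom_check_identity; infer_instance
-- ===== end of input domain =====

-- B replaces the 13-point evaluation loop by a closed-form comparison of
-- quadratic coefficients (objective: simpler).

-- ===== PORT A =====
-- v1 assignment of the loop body (None when n1 is not 3/6/4)
def pvV1 (n1 x : Int) : Option Int :=
  if n1 = 3 then some (x ^ 2 + x + 1)
  else if n1 = 6 then some (x ^ 2 - x + 1)
  else if n1 = 4 then some (x ^ 2 + 1)
  else none

-- v2 assignment of the loop body
def pvV2 (n2 shift x : Int) : Option Int :=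
  if n2 = 3 then some ((x + shift) ^ 2 + (x + shift) + 1)
  else if n2 = 6 then some ((x + shift) ^ 2 - (x + shift) + 1)
  else if n2 = 4 then some ((x + shift) ^ 2 + 1)
  else none

-- the for-loop with its early `return False`
def pvGoA (n1 n2 shift : Int) : List Int → Bool
  | [] => true
  | x :: rest => if pvV1 n1 x ≠ pvV2 n2 shift x then false else pvGoA n1 n2 shift rest

def check_identity (n1 : Int) (n2 : Int) (shift : Int) : Bool :=
  pvGoA n1 n2 shift (PySem.List.pyRange 2 15 1)

-- ===== PORT B =====
-- (b, c) of the monic quadratic x^2 + b*x + c for Phi_n, none if n unhandled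
def pvCoeffs (n : Int) : Option (Int × Int) :=
  if n = 3 then some (1, 1)
  else if n = 6 then some (-1, 1)
  else if n = 4 then some (0, 1)
  else none

def check_identity_alt (n1 : Int) (n2 : Int) (shift : Int) : Bool :=
  match pvCoeffs n1, pvCoeffs n2 with
  | none, none => true
  | none, some _ => false
  | some _, none => false
  | some (b1, k1), some (b2, k2) =>
      decide (b1 = 2 * shift + b2 ∧ k1 = shift * shift + b2 * shift + k2)

-- ===== PRECONDITION & SPEC =====
def Spec_check_identity (n1 : Int) (n2 : Int) (shift : Int) (out : Bool) : Prop := out = check_identity_alt n1 n2 shift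
instance (n1 : Int) (n2 : Int) (shift : Int) (out : Bool) : Decidable (Spec_check_identity n1 n2 shift out) := by unfold Spec_check_identity; infer_instance

-- ===== CLAIM (what is proved, stated in full; the proofs are below) =====
def Claim_equal_check_identity : Prop := ∀ (n1 : Int) (n2 : Int) (shift : Int), Dom_check_identity n1 n2 shift → Spec_check_identity n1 n2 shift (check_identity n1 n2 shift)

-- ===== LEMMAS AND PROOFS =====

theorem pyRange_eval : PySem.List.pyRange 2 15 1 = [2,3,4,5,6,7,8,9,10,11,12,13,14] := by decide

theorem coeffs_v1 (n b k : Int) (h : pvCoeffs n = some (b, k)) (x : Int) :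
    pvV1 n x = some (x ^ 2 + b * x + k) := by
  unfold pvCoeffs at h
  unfold pvV1
  split_ifs at h with h1 h2 h3 <;>
    simp only [Option.some.injEq, Prod.mk.injEq] at h <;>
    obtain ⟨hb, hk⟩ := h <;> subst hb <;> subst hk <;> split_ifs <;>
    first | omega | (congr 1; ring)

theorem coeffs_v1_none (n : Int) (h : pvCoeffs n = none) (x : Int) : pvV1 n x = none := by
  unfold pvCoeffs at h
  unfold pvV1
  split_ifs at h
  all_goals simp_all

theorem coeffs_v2 (n b k : Int) (h : pvCoeffs n = some (b, k)) (s x : Int) :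
    pvV2 n s x = some ((x + s) ^ 2 + b * (x + s) + k) := by
  unfold pvCoeffs at h
  unfold pvV2
  split_ifs at h with h1 h2 h3 <;>
    simp only [Option.some.injEq, Prod.mk.injEq] at h <;>
    obtain ⟨hb, hk⟩ := h <;> subst hb <;> subst hk <;> split_ifs <;>
    first | omega | (congr 1; ring)

theorem coeffs_v2_none (n : Int) (h : pvCoeffs n = none) (s x : Int) : pvV2 n s x = none := by
  unfold pvCoeffs at h
  unfold pvV2
  split_ifs at h
  all_goals simp_all

theorem goA_key (n1 n2 s b1 k1 b2 k2 : Int)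
    (hv1 : ∀ x, pvV1 n1 x = some (x ^ 2 + b1 * x + k1))
    (hv2 : ∀ x, pvV2 n2 s x = some ((x + s) ^ 2 + b2 * (x + s) + k2)) :
    pvGoA n1 n2 s [2,3,4,5,6,7,8,9,10,11,12,13,14] =
      decide (b1 = 2 * s + b2 ∧ k1 = s * s + b2 * s + k2) := by
  by_cases hc : (b1 = 2 * s + b2 ∧ k1 = s * s + b2 * s + k2)
  · have heq : ∀ x : Int, pvV1 n1 x = pvV2 n2 s x := by
      intro x
      rw [hv1, hv2]
      obtain ⟨hb, hk⟩ := hc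
      subst hb; subst hk
      congr 1
      ring
    simp [pvGoA, heq, hc]
  · rw [decide_eq_false hc]
    by_cases p2 : pvV1 n1 2 = pvV2 n2 s 2
    · by_cases p3 : pvV1 n1 3 = pvV2 n2 s 3
      · exfalso
        apply hc
        rw [hv1, hv2] at p2 p3
        injection p2 with p2
        injection p3 with p3
        constructor
        · linear_combination p3 - p2
        · linear_combination 3 * p2 - 2 * p3
      · simp [pvGoA, p2, p3]
    · simp [pvGoA, p2]

-- ===== VERDICT (by name: the statement is the Claim_ definition above) =====
theorem check_identity_spec : Claim_equal_check_identity := by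
  intro n1 n2 shift _
  unfold Spec_check_identity check_identity check_identity_alt
  rw [pyRange_eval]
  rcases hc1 : pvCoeffs n1 with _ | ⟨b1, k1⟩ <;> rcases hc2 : pvCoeffs n2 with _ | ⟨b2, k2⟩
  · simp [pvGoA, coeffs_v1_none n1 hc1, coeffs_v2_none n2 hc2]
  · simp [pvGoA, coeffs_v1_none n1 hc1, coeffs_v2 n2 b2 k2 hc2]
  · simp [pvGoA, coeffs_v1 n1 b1 k1 hc1, coeffs_v2_none n2 hc2]
  · exact goA_key n1 n2 shift b1 k1 b2 k2 (coeffs_v1 n1 b1 k1 hc1) (coeffs_v2 n2 b2 k2 hc2 shift)
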